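-- pv_equiv track=rewrite | github.com/Huyanmei123/ReCC | recc/train.py | fix_missing_number
-- ===== SOURCE A (Python) =====
-- def fix_missing_number(lst):
--     n = len(lst)
--     for i in range(1, n):
--
--         if lst[i] - lst[i-1] != 1:
--
--             for j in range(i, n):
--                 lst[j] -= 1
--             break
--     return lst
-- ===== SOURCE B (Python) =====
-- def fix_missing_number(lst):
--     # Single pass with a running "expected value" counter: while each element
--     # equals lst[0] + i the prefix is intact; from the first deviation on,
--     # every element is decremented in place in the same iteration.
--     exp = lst[0] if lst else 0
--     intact = True
--     for i, x in enumerate(lst):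
--         intact = intact and x == exp
--         if not intact:
--             lst[i] = x - 1
--         exp += 1
--     return lst
-- ===== Notes on version B (the rewrite author's own statement) =====
-- stated objective: alternative
-- what changed: Replaces A's two nested index loops (find the first adjacent-difference gap, then a second loop decrementing the tail) by one single pass that carries a running expected value lst[0]+i and an 'intact' flag, decrementing each element in the same iteration once the prefix first deviates from the expected counter.
import Mathlib
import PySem

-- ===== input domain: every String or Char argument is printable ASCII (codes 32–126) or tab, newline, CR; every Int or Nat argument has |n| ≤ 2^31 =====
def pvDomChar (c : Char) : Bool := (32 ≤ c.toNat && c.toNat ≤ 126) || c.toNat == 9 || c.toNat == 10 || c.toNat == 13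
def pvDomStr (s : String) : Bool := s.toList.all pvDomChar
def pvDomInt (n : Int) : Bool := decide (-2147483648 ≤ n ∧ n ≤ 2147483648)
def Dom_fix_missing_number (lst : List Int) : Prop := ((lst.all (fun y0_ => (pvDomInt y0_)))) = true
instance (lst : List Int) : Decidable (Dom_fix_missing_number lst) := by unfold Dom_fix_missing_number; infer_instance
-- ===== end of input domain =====

-- B replaces A's nested index loops (find first adjacent gap, then decrement the tail in a
-- second loop) by one single pass carrying a running expected value and an 'intact' flag
-- (alternative decomposition). Return-value equivalence; both Pythons mutate lst in place
-- identically.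

-- ===== PORT A =====
-- inner loop `for j in range(i, n): lst[j] -= 1` (indices are valid, so lst[j] is getD)
def pvDecFrom (lst : List Int) (j n : Nat) : List Int :=
  if j < n then pvDecFrom (lst.set j (lst.getD j 0 - 1)) (j + 1) n else lst
termination_by n - j

-- outer loop `for i in range(1, n): if gap: inner; break`
def pvScanA (lst : List Int) (i n : Nat) : List Int :=
  if i < n then
    if lst.getD i 0 - lst.getD (i - 1) 0 ≠ 1 then pvDecFrom lst i n
    else pvScanA lst (i + 1) n
  else lst
termination_by n - i

def fix_missing_number (lst : List Int) : List Int :=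
  pvScanA lst 1 lst.length

-- ===== PORT B =====
-- the `for i, x in enumerate(lst)` loop, state = (exp, intact); the in-place write
-- `lst[i] = x - 1` at the current position becomes emitting the element of the output list
def pvGoB (s : List Int) (exp : Int) (intact : Bool) : List Int :=
  match s with
  | [] => []
  | x :: rest =>
    let intact := intact && (x == exp)
    (if !intact then x - 1 else x) :: pvGoB rest (exp + 1) intact

def fix_missing_number_alt (lst : List Int) : List Int :=
  pvGoB lst (lst.headD 0) true

-- ===== PRECONDITION & SPEC =====
def Spec_fix_missing_number (lst : List Int) (out : List Int) : Prop := out = fix_missing_number_alt lst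
instance (lst : List Int) (out : List Int) : Decidable (Spec_fix_missing_number lst out) := by unfold Spec_fix_missing_number; infer_instance

-- ===== CLAIM (what is proved, stated in full; the proofs are below) =====
def Claim_equal_fix_missing_number : Prop := ∀ (lst : List Int), Dom_fix_missing_number lst → Spec_fix_missing_number lst (fix_missing_number lst)

-- ===== LEMMAS AND PROOFS =====

-- length of the longest prefix of s matching the counter e, e+1, e+2, …
def pvFd (s : List Int) (e : Int) : Nat :=
  match s with
  | [] => 0
  | x :: rest => if x = e then pvFd rest (e + 1) + 1 else 0

lemma pv_take_set (l : List Int) (j : Nat) (v : Int) (h : j < l.length) :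
    (l.set j v).take (j+1) = l.take j ++ [v] := by
  have h2 : (l.take j).set j v = l.take j :=
    List.set_eq_of_length_le (by simp)
  rw [List.take_add_one]
  simp [List.take_set, List.getElem?_set_self (by simpa using h), h2]

lemma pv_drop_set (l : List Int) (j : Nat) (v : Int) :
    (l.set j v).drop (j+1) = l.drop (j+1) := by
  rw [List.drop_set]; simp

lemma pv_map_drop (l : List Int) (j : Nat) (h : j < l.length) (f : Int → Int) :
    (l.drop j).map f = f l[j] :: (l.drop (j+1)).map f := by
  rw [List.drop_eq_getElem_cons h]
  simp only [List.map_cons]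

lemma pvDecFrom_eq : ∀ (d : Nat) (lst : List Int) (j : Nat), lst.length - j = d →
    pvDecFrom lst j lst.length = lst.take j ++ (lst.drop j).map (· - 1) := by
  intro d
  induction d with
  | zero =>
    intro lst j h
    rw [pvDecFrom]
    rw [if_neg (by omega)]
    rw [List.take_of_length_le (by omega), List.drop_eq_nil_of_le (by omega)]
    simp
  | succ d ih =>
    intro lst j h
    have hj : j < lst.length := by omega
    rw [pvDecFrom, if_pos hj]
    have hlen : (lst.set j (lst.getD j 0 - 1)).length = lst.length := by simp
    rw [show lst.length = (lst.set j (lst.getD j 0 - 1)).length from hlen.symm]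
    rw [ih _ (j+1) (by rw [hlen]; omega)]
    rw [pv_take_set _ _ _ hj, pv_drop_set, pv_map_drop _ _ hj]
    rw [List.getD_eq_getElem _ _ hj]
    simp

lemma pvScanA_eq : ∀ (d : Nat) (lst : List Int) (i : Nat), lst.length - i = d →
    pvScanA lst i lst.length =
      (let k := (((List.range' i (lst.length - i)).find?
          (fun t => lst.getD t 0 - lst.getD (t - 1) 0 != 1)).getD lst.length);
       lst.take k ++ (lst.drop k).map (· - 1)) := by
  intro d
  induction d with
  | zero =>
    intro lst i h
    rw [pvScanA, if_neg (by omega)]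
    simp only [h, List.range'_zero, List.find?_nil, Option.getD_none]
    rw [List.take_of_length_le (by omega), List.drop_eq_nil_of_le (by omega)]
    simp
  | succ d ih =>
    intro lst i h
    have hi : i < lst.length := by omega
    rw [pvScanA, if_pos hi]
    rw [h, List.range'_succ, List.find?_cons]
    by_cases hp : lst.getD i 0 - lst.getD (i - 1) 0 ≠ 1
    · rw [if_pos hp]
      simp only [show (lst.getD i 0 - lst.getD (i - 1) 0 != 1) = true by simpa using hp]
      simp only [Option.getD_some]
      exact pvDecFrom_eq _ lst i (by omega)
    · rw [if_neg hp]
      simp only [show (lst.getD i 0 - lst.getD (i - 1) 0 != 1) = false by simpa using hp]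
      have := ih lst (i+1) (by omega)
      rw [show lst.length - (i+1) = d by omega] at this
      exact this

-- once the flag is down, pvGoB just decrements everything
lemma pvGoB_false : ∀ (s : List Int) (e : Int), pvGoB s e false = s.map (· - 1) := by
  intro s
  induction s with
  | nil => intro e; rfl
  | cons x r ih => intro e; simp [pvGoB, ih]

-- while the flag is up, pvGoB keeps the matching prefix and decrements the rest
lemma pvGoB_true : ∀ (s : List Int) (e : Int),
    pvGoB s e true = s.take (pvFd s e) ++ (s.drop (pvFd s e)).map (· - 1) := by
  intro s
  induction s with
  | nil => intro e; rfl
  | cons x r ih =>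
    intro e
    by_cases hx : x = e
    · simp only [pvGoB, pvFd, if_pos hx, show (x == e) = true by simpa using hx]
      simp [ih, List.take_succ_cons, List.drop_succ_cons]
    · simp only [pvGoB, pvFd, if_neg hx, show (x == e) = false by simpa using hx]
      simp [pvGoB_false]

-- A's first-gap index (adjacent differences) equals the first deviation from the counter,
-- given the invariant that the element just before position i equals e - 1
lemma pv_find_eq_fd : ∀ (s full : List Int) (i : Nat) (e : Int),
    1 ≤ i → full.drop i = s → i ≤ full.length → full.getD (i-1) 0 = e - 1 →
    ((List.range' i (full.length - i)).find?
        (fun t => full.getD t 0 - full.getD (t - 1) 0 != 1)).getD full.length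
      = i + pvFd s e := by
  intro s
  induction s with
  | nil =>
    intro full i e _ hdrop hle _
    have : full.length ≤ i := by
      by_contra hlt
      have := congrArg List.length hdrop
      simp at this; omega
    have hi : i = full.length := by omega
    simp [hi, pvFd]
  | cons y s' ih =>
    intro full i e h1 hdrop hle hprev
    have hlen : i < full.length := by
      by_contra hlt
      rw [List.drop_eq_nil_of_le (by omega)] at hdrop
      exact List.cons_ne_nil _ _ hdrop.symm
    have hy : full.getD i 0 = y := by
      rw [List.getD_eq_getElem _ _ hlen]
      have : full[i] :: full.drop (i+1) = y :: s' := by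
        rw [← List.drop_eq_getElem_cons hlen, hdrop]
      exact (List.cons.injEq _ _ _ _ ▸ this).1
    rw [show full.length - i = (full.length - (i+1)) + 1 by omega, List.range'_succ,
        List.find?_cons]
    by_cases hgap : y ≠ e
    · have : (full.getD i 0 - full.getD (i - 1) 0 != 1) = true := by
        rw [hy, hprev]; simp; omega
      rw [this]
      simp [pvFd, if_neg hgap]
    · rw [not_ne_iff] at hgap
      have : (full.getD i 0 - full.getD (i - 1) 0 != 1) = false := by
        rw [hy, hprev, hgap]; simp
      rw [this]
      have hd' : full.drop (i+1) = s' := by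
        have : full[i] :: full.drop (i+1) = y :: s' := by
          rw [← List.drop_eq_getElem_cons hlen, hdrop]
        exact (List.cons.injEq _ _ _ _ ▸ this).2
      have hinv : full.getD ((i+1) - 1) 0 = (e+1) - 1 := by
        have h0 : (i+1) - 1 = i := rfl
        rw [h0, hy, hgap]; ring
      have := ih full (i+1) (e+1) (by omega) hd' (by omega) hinv
      rw [this]
      simp [pvFd, if_pos hgap]
      omega

-- ===== VERDICT (by name: the statement is the Claim_ definition above) =====
theorem fix_missing_number_spec : Claim_equal_fix_missing_number := by
  intro lst _
  show fix_missing_number lst = fix_missing_number_alt lst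
  rw [fix_missing_number, fix_missing_number_alt]
  cases lst with
  | nil => rw [pvScanA]; simp [pvGoB]
  | cons x r =>
    rw [pvScanA_eq ((x :: r).length - 1) (x :: r) 1 rfl]
    rw [pvGoB_true]
    have hfind := pv_find_eq_fd r (x :: r) 1 (x + 1) le_rfl rfl (by simp) (by simp)
    simp only [List.headD_cons, List.length_cons, Nat.add_sub_cancel] at hfind ⊢
    rw [hfind]
    simp [pvFd, Nat.add_comm]
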